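-- pv_equiv track=rewrite | github.com/SebSchroeter/masterthesis | optimization_functions.py | help_test_mvws
-- ===== SOURCE A (Python) =====
-- import itertools
--
-- def help_test_mvws(optimized_seats):
--     '''helper function for test_mvws'''
--     ## creates dict just like winning_coal_dict but from mvw´s, used later to ensure equivalency of games
--     ## takes in dict from mvw_to_parties and uses same logic as coalition_combinatorics_generator and win_coals but for dicts
--
--     mw_winning_coal_dict = {}
--     total_seats = sum(optimized_seats.values()) #new Q
--     parties = list(optimized_seats.keys())
--
--     # Generate all unique coalitions
--     mw_winning_coal_dict[''] = 0 #add empty coal manually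
--     for r in range(1, len(parties) + 1):
--         for combo in itertools.combinations(parties, r):
--             coalition = '+'.join(combo) #name of coalition
--             coalition_seats = sum(optimized_seats[party] for party in combo) #seats is sum of their weights
--             mw_winning_coal_dict[coalition] = 1 if coalition_seats > (total_seats / 2) else 0 #indicate winning or losing (again, with strict inequality)
--
--     return mw_winning_coal_dict
-- ===== SOURCE B (Python) =====
-- def help_test_mvws(optimized_seats):
--     '''helper function for test_mvws'''
--     # Breadth-first powerset layers with incremental names and seat sums,
--     # instead of itertools.combinations with a fresh join/sum per coalition.
--     total_seats = sum(optimized_seats.values())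
--     items = list(optimized_seats.items())
--     result = {'': 0}
--     layer = []  # (coalition_name, seat_sum, remaining items after the last member)
--     for i, (p, w) in enumerate(items):
--         result[p] = 1 if w > total_seats / 2 else 0
--         layer.append((p, w, items[i + 1:]))
--     while layer:
--         new_layer = []
--         for name, seats, rest in layer:
--             for i, (p, w) in enumerate(rest):
--                 nname = name + "+" + p
--                 nseats = seats + w
--                 result[nname] = 1 if nseats > total_seats / 2 else 0
--                 new_layer.append((nname, nseats, rest[i + 1:]))
--         layer = new_layer
--     return result
-- ===== Notes on version B (the rewrite author's own statement) =====
-- stated objective: alternative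
-- what changed: Replaces the per-size itertools.combinations loops (each coalition re-joined and re-summed from scratch) by a breadth-first layer expansion of the powerset that carries each coalition's name string and seat sum incrementally, extending only with the items after the last member.
import Mathlib
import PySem

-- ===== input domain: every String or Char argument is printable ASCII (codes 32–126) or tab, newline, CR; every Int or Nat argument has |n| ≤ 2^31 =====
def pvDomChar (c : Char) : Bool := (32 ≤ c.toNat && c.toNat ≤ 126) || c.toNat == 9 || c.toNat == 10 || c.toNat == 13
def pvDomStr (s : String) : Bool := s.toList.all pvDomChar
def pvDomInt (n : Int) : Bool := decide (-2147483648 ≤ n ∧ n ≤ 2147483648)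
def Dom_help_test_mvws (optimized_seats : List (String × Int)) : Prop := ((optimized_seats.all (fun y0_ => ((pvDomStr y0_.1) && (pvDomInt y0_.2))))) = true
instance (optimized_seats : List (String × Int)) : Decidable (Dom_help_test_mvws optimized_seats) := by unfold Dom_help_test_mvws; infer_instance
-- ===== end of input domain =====

-- B replaces the per-size itertools.combinations loops by a breadth-first layer
-- expansion of the powerset carrying coalition names and seat sums incrementally (objective: alternative).


-- ===== PORT A =====
-- itertools.combinations(parties, r), transliterated: same output sequence (lexicographic
-- by position), step for step on lists.
def pyCombinations {α : Type} : List α → Nat → List (List α)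
  | _, 0 => [[]]
  | [], _ + 1 => []
  | x :: t, r + 1 => (pyCombinations t r).map (fun c => x :: c) ++ pyCombinations t (r + 1)
  termination_by xs _ => xs.length

-- 'coalition_seats > total_seats / 2' is Python float comparison; on integers it is exactly
-- 'total_seats < 2 * coalition_seats'.  'optimized_seats[party]' is ported as getD _ 0: party
-- is always a key of the dict, so the default is never taken.
def help_test_mvws (optimized_seats : List (String × Int)) : List (String × Int) :=
  let d := PySem.Dict.ofList optimized_seats
  let total_seats : Int := (PySem.Dict.values d).sum
  let parties := PySem.Dict.keys d
  let init : PySem.Dict String Int := PySem.Dict.insert PySem.Dict.empty "" 0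
  let final :=
    (PySem.List.pyRange 1 ((parties.length : Int) + 1) 1).foldl
      (fun acc r =>
        (pyCombinations parties r.toNat).foldl
          (fun acc2 combo =>
            let coalition := PySem.Str.join "+" combo
            let coalition_seats : Int := (combo.map (fun p => PySem.Dict.getD d p 0)).sum
            PySem.Dict.insert acc2 coalition (if total_seats < 2 * coalition_seats then 1 else 0))
          acc)
      init
  PySem.Dict.items final

-- ===== PORT B =====
-- the seeding 'for i, (p, w) in enumerate(items)' loop: rest after index i is the tail t
def altSeed (total : Int) :
    List (String × Int) →
    PySem.Dict String Int × List (String × Int × List (String × Int)) →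
    PySem.Dict String Int × List (String × Int × List (String × Int))
  | [], acc => acc
  | (p, w) :: t, (res, layer) =>
      altSeed total t
        (PySem.Dict.insert res p (if total < 2 * w then 1 else 0), layer ++ [(p, w, t)])

-- the inner 'for i, (p, w) in enumerate(rest)' loop of the while body
def altExtend (total : Int) (name : String) (seats : Int) :
    List (String × Int) →
    PySem.Dict String Int × List (String × Int × List (String × Int)) →
    PySem.Dict String Int × List (String × Int × List (String × Int))
  | [], acc => acc
  | (p, w) :: t, (res, nl) =>
      altExtend total name seats t
        (PySem.Dict.insert res (name ++ "+" ++ p) (if total < 2 * (seats + w) then 1 else 0),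
         nl ++ [(name ++ "+" ++ p, seats + w, t)])

-- the 'while layer:' loop; fuel = items.length is enough (layer k holds the k+1-member
-- coalitions, so it empties after at most items.length rounds) and only makes it total
def altLoop (total : Int) :
    Nat → List (String × Int × List (String × Int)) → PySem.Dict String Int →
    PySem.Dict String Int
  | 0, _, res => res
  | _ + 1, [], res => res
  | fuel + 1, tp :: rest, res =>
      let st := (tp :: rest).foldl (fun acc t => altExtend total t.1 t.2.1 t.2.2 acc)
        (res, ([] : List (String × Int × List (String × Int))))
      altLoop total fuel st.2 st.1

def help_test_mvws_alt (optimized_seats : List (String × Int)) : List (String × Int) :=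
  let d := PySem.Dict.ofList optimized_seats
  let total_seats : Int := (PySem.Dict.values d).sum
  let items := PySem.Dict.items d
  let seeded := altSeed total_seats items
    (PySem.Dict.insert PySem.Dict.empty "" 0, [])
  PySem.Dict.items (altLoop total_seats items.length seeded.2 seeded.1)

-- ===== PRECONDITION & SPEC =====
def Spec_help_test_mvws (optimized_seats : List (String × Int)) (out : List (String × Int)) : Prop := out = help_test_mvws_alt optimized_seats
instance (optimized_seats : List (String × Int)) (out : List (String × Int)) : Decidable (Spec_help_test_mvws optimized_seats out) := by unfold Spec_help_test_mvws; infer_instance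

-- ===== CLAIM (what is proved, stated in full; the proofs are below) =====
def Claim_equal_help_test_mvws : Prop := ∀ (optimized_seats : List (String × Int)), Dom_help_test_mvws optimized_seats → Spec_help_test_mvws optimized_seats (help_test_mvws optimized_seats)


-- ===== LEMMAS AND PROOFS =====

-- fold of flag-inserts over a list of (name, seats) pairs
def pvIns (total : Int) (res : PySem.Dict String Int) (l : List (String × Int)) :
    PySem.Dict String Int :=
  l.foldl (fun a x => PySem.Dict.insert a x.1 (if total < 2 * x.2 then 1 else 0)) res

-- combinations together with the remaining suffix after the last chosen element
def combR {α : Type} : List α → Nat → List (List α × List α)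
  | l, 0 => [([], l)]
  | [], _ + 1 => []
  | x :: t, k + 1 => (combR t k).map (fun c => (x :: c.1, c.2)) ++ combR t (k + 1)
  termination_by xs _ => xs.length

def extName (nm : String) (c : List (String × Int)) : String :=
  c.foldl (fun a p => a ++ "+" ++ p.1) nm

def nameOf : List (String × Int) → String
  | [] => ""
  | x :: t => extName x.1 t

def sumOf (c : List (String × Int)) : Int := (c.map Prod.snd).sum

def layerP (nm : String) (s : Int) (l : List (String × Int)) (k : Nat) :
    List (String × Int × List (String × Int)) :=
  (combR l k).map (fun c => (extName nm c.1, s + sumOf c.1, c.2))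

def layerC (l : List (String × Int)) (k : Nat) :
    List (String × Int × List (String × Int)) :=
  (combR l k).map (fun c => (nameOf c.1, sumOf c.1, c.2))

def projT (t : String × Int × List (String × Int)) : String × Int := (t.1, t.2.1)

theorem pvIns_append (total : Int) (res : PySem.Dict String Int)
    (a b : List (String × Int)) :
    pvIns total res (a ++ b) = pvIns total (pvIns total res a) b := by
  simp [pvIns, List.foldl_append]

theorem layerP_cons_succ (nm : String) (s : Int) (x : String × Int)
    (t : List (String × Int)) (k : Nat) :
    layerP nm s (x :: t) (k + 1)
      = layerP (nm ++ "+" ++ x.1) (s + x.2) t k ++ layerP nm s t (k + 1) := by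
  simp [layerP, combR, List.map_map, extName, sumOf, Function.comp_def, add_assoc]

theorem layerC_cons_succ (x : String × Int) (t : List (String × Int)) (k : Nat) :
    layerC (x :: t) (k + 1) = layerP x.1 x.2 t k ++ layerC t (k + 1) := by
  simp [layerC, layerP, combR, List.map_map, nameOf, extName, sumOf, Function.comp_def]

theorem layerP_succ (l : List (String × Int)) :
    ∀ (k : Nat) (nm : String) (s : Int),
      layerP nm s l (k + 1)
        = (layerP nm s l k).flatMap (fun t => layerP t.1 t.2.1 t.2.2 1) := by
  induction l with
  | nil =>
      intro k nm s
      cases k with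
      | zero => simp [layerP, combR, extName]
      | succ k => simp [layerP, combR]
  | cons x t ih =>
      intro k nm s
      cases k with
      | zero =>
          simp only [layerP, combR, List.map_nil, List.map_cons, List.flatMap_cons,
            List.flatMap_nil, List.append_nil, extName, List.foldl_nil]
          rw [show s + sumOf ([] : List (String × Int)) = s by simp [sumOf]]
      | succ k =>
          rw [layerP_cons_succ, layerP_cons_succ, List.flatMap_append, ← ih, ← ih]

theorem layerC_succ (l : List (String × Int)) :
    ∀ (k : Nat),
      layerC l (k + 2)
        = (layerC l (k + 1)).flatMap (fun t => layerP t.1 t.2.1 t.2.2 1) := by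
  induction l with
  | nil => intro k; simp [layerC, combR]
  | cons x t ih =>
      intro k
      rw [layerC_cons_succ, layerC_cons_succ, List.flatMap_append, ← layerP_succ, ← ih]

theorem layerC_one_cons (p : String) (w : Int) (t : List (String × Int)) :
    layerC ((p, w) :: t) 1 = (p, w, t) :: layerC t 1 := by
  simp [layerC, combR, nameOf, extName, sumOf]

theorem altExtend_eq (total : Int) (nm : String) (s : Int) (l : List (String × Int)) :
    ∀ (res : PySem.Dict String Int) (nl : List (String × Int × List (String × Int))),
      altExtend total nm s l (res, nl)
        = (pvIns total res ((layerP nm s l 1).map projT), nl ++ layerP nm s l 1) := by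
  induction l with
  | nil => intro res nl; simp [altExtend, layerP, combR, pvIns]
  | cons x t ih =>
      intro res nl
      obtain ⟨p, w⟩ := x
      have hl : layerP nm s ((p, w) :: t) 1
          = (nm ++ "+" ++ p, s + w, t) :: layerP nm s t 1 := by
        simp [layerP, combR, extName, sumOf]
      rw [hl]
      simp only [altExtend, ih, pvIns, List.foldl_cons, projT, List.map_cons,
        List.append_assoc, List.singleton_append]

theorem altSeed_eq (total : Int) (l : List (String × Int)) :
    ∀ (res : PySem.Dict String Int) (layer0 : List (String × Int × List (String × Int))),
      altSeed total l (res, layer0)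
        = (pvIns total res ((layerC l 1).map projT), layer0 ++ layerC l 1) := by
  induction l with
  | nil => intro res layer0; simp [altSeed, layerC, combR, pvIns]
  | cons x t ih =>
      intro res layer0
      obtain ⟨p, w⟩ := x
      rw [layerC_one_cons]
      simp only [altSeed, ih, pvIns, List.foldl_cons, projT, List.map_cons,
        List.append_assoc, List.singleton_append]

theorem step_eq (total : Int) (layer : List (String × Int × List (String × Int))) :
    ∀ (res : PySem.Dict String Int) (nl0 : List (String × Int × List (String × Int))),
      layer.foldl (fun acc t => altExtend total t.1 t.2.1 t.2.2 acc) (res, nl0)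
        = (pvIns total res
            (((layer.flatMap (fun t => layerP t.1 t.2.1 t.2.2 1))).map projT),
           nl0 ++ layer.flatMap (fun t => layerP t.1 t.2.1 t.2.2 1)) := by
  induction layer with
  | nil => intro res nl0; simp [pvIns]
  | cons t rest ih =>
      intro res nl0
      simp only [List.foldl_cons, altExtend_eq, ih, List.flatMap_cons, List.map_append,
        pvIns_append, List.append_assoc]

theorem combR_nil_of_lt {α : Type} (l : List α) :
    ∀ (k : Nat), l.length < k → combR l k = [] := by
  induction l with
  | nil =>
      intro k hk
      cases k with
      | zero => omega
      | succ k => simp [combR]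
  | cons x t ih =>
      intro k hk
      cases k with
      | zero => simp at hk
      | succ k =>
          simp only [combR]
          rw [ih k (by simpa using hk), ih (k + 1) (by simp at hk; omega)]
          simp

theorem layerC_nil_mono (l : List (String × Int)) (k : Nat) (hk : 1 ≤ k)
    (h : layerC l k = []) : ∀ (i : Nat), layerC l (k + i) = [] := by
  intro i
  induction i with
  | zero => simpa using h
  | succ i ihi =>
      obtain ⟨k', rfl⟩ : ∃ k', k = k' + 1 := ⟨k - 1, by omega⟩
      have : k' + 1 + (i + 1) = (k' + i) + 2 := by omega
      rw [this, layerC_succ]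
      have : k' + 1 + i = (k' + i) + 1 := by omega
      rw [this] at ihi
      rw [ihi]
      rfl

theorem altLoop_eq (total : Int) (l : List (String × Int)) :
    ∀ (j k : Nat) (res : PySem.Dict String Int), 1 ≤ k →
      altLoop total j (layerC l k) res
        = pvIns total res
            ((List.range j).flatMap (fun i => (layerC l (k + 1 + i)).map projT)) := by
  intro j
  induction j with
  | zero => intro k res hk; simp [altLoop, pvIns]
  | succ j ih =>
      intro k res hk
      cases hL : layerC l k with
      | nil =>
          have hall : ∀ i : Nat, layerC l (k + 1 + i) = [] := by
            intro i
            have := layerC_nil_mono l k hk hL (1 + i)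
            simpa [Nat.add_assoc] using this
          have h1 : (List.range (j + 1)).flatMap
              (fun i => (layerC l (k + 1 + i)).map projT) = [] := by
            apply List.flatMap_eq_nil_iff.mpr
            intro x _
            rw [hall x]
            rfl
          rw [h1]
          simp [altLoop, pvIns]
      | cons tp rest =>
          obtain ⟨k', rfl⟩ : ∃ k', k = k' + 1 := ⟨k - 1, by omega⟩
          simp only [altLoop]
          rw [← hL, step_eq, ← layerC_succ]
          dsimp only
          simp only [List.nil_append]
          rw [ih (k' + 2) _ (by omega)]
          rw [← pvIns_append]
          congr 1
          rw [List.range_succ_eq_map, List.flatMap_cons, List.flatMap_map]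
          congr 1
          exact congrArg (fun f => List.flatMap f (List.range j))
            (funext fun i => by
              rw [show k' + 1 + 1 + Nat.succ i = k' + 2 + 1 + i from by omega])

theorem foldl_pvIns (total : Int) {β : Type} (h : β → List (String × Int)) :
    ∀ (rs : List β) (acc : PySem.Dict String Int),
      rs.foldl (fun acc r => pvIns total acc (h r)) acc
        = pvIns total acc (rs.flatMap h) := by
  intro rs
  induction rs with
  | nil => intro acc; simp [pvIns]
  | cons r rest ih => intro acc; simp [List.foldl_cons, ih, pvIns_append]

theorem pyCombinations_map {α β : Type} (f : α → β) (l : List α) :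
    ∀ (k : Nat), pyCombinations (l.map f) k = (combR l k).map (fun c => c.1.map f) := by
  induction l with
  | nil =>
      intro k
      cases k with
      | zero => simp [pyCombinations, combR]
      | succ k => simp [pyCombinations, combR]
  | cons x t ih =>
      intro k
      cases k with
      | zero => simp [pyCombinations, combR]
      | succ k =>
          simp only [List.map_cons, pyCombinations, combR, ih, List.map_append,
            List.map_map, Function.comp_def, List.map_cons]

theorem combR_sublist {α : Type} (l : List α) :
    ∀ (k : Nat) (c : List α × List α), c ∈ combR l k → c.1.Sublist l ∧ c.1.length = k := by
  induction l with
  | nil =>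
      intro k c hc
      cases k with
      | zero => simp [combR] at hc; simp [hc]
      | succ k => simp [combR] at hc
  | cons x t ih =>
      intro k c hc
      cases k with
      | zero =>
          simp [combR] at hc
          simp [hc]
      | succ k =>
          simp only [combR, List.mem_append, List.mem_map] at hc
          rcases hc with ⟨c', hc', rfl⟩ | hc
          · have := ih k c' hc'
            exact ⟨List.Sublist.cons₂ x this.1, by simp [this.2]⟩
          · have := ih (k + 1) c hc
            exact ⟨List.Sublist.cons x this.1, this.2⟩

-- string-side: '+'.join(a :: ss) is the left fold of '++ "+" ++' starting at a
theorem chars_foldl_pre (sep : List Char) (r : List (List Char)) :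
    ∀ (b pre : List Char),
      pre ++ r.foldl (fun u v => u ++ sep ++ v) b
        = r.foldl (fun u v => u ++ sep ++ v) (pre ++ b) := by
  induction r with
  | nil => intro b pre; rfl
  | cons c r ih =>
      intro b pre
      simp only [List.foldl_cons]
      rw [ih]
      simp [List.append_assoc]

theorem chars_join_foldl (sep : List Char) (ss : List (List Char)) :
    ∀ (a : List Char),
      PySem.Chars.join sep (a :: ss) = ss.foldl (fun u v => u ++ sep ++ v) a := by
  induction ss with
  | nil => intro a; simp [PySem.Chars.join_singleton]
  | cons b r ih =>
      intro a
      rw [PySem.Chars.join_cons_cons, ih, List.foldl_cons, ← chars_foldl_pre]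

theorem toList_foldl_join (ss : List String) :
    ∀ (a : String),
      (ss.foldl (fun u v => u ++ "+" ++ v) a).toList
        = (ss.map String.toList).foldl (fun u v => u ++ ['+'] ++ v) a.toList := by
  induction ss with
  | nil => intro a; rfl
  | cons b r ih =>
      intro a
      simp only [List.foldl_cons, List.map_cons, ih]
      congr 1
      simp [String.toList_append]

theorem string_of_toList {s t : String} (h : s.toList = t.toList) : s = t :=
  String.toList_inj.mp h

theorem join_eq_foldl (ss : List String) (a : String) :
    PySem.Str.join "+" (a :: ss) = ss.foldl (fun u v => u ++ "+" ++ v) a := by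
  apply string_of_toList
  rw [toList_foldl_join]
  have := PySem.Str.toList_join "+" (a :: ss)
  simp only [this, List.map_cons]
  rw [chars_join_foldl]
  rfl

theorem nameOf_eq_join (c : List (String × Int)) (hc : c ≠ []) :
    PySem.Str.join "+" (c.map Prod.fst) = nameOf c := by
  cases c with
  | nil => exact absurd rfl hc
  | cons x t =>
      simp only [List.map_cons, nameOf, extName]
      rw [join_eq_foldl, List.foldl_map]

theorem sum_getD_eq (d : PySem.Dict String Int) (hnd : d.keys.Nodup) :
    ∀ (c : List (String × Int)), (∀ x ∈ c, x ∈ d.items) →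
      (((c.map Prod.fst).map (fun p => PySem.Dict.getD d p 0))).sum = sumOf c := by
  intro c
  induction c with
  | nil => intro _; simp [sumOf]
  | cons x t ih =>
      intro hmem
      have hx : PySem.Dict.getD d x.1 0 = x.2 := by
        have : (x.1, x.2) ∈ d.items := by
          have := hmem x (List.mem_cons_self)
          simpa using this
        exact PySem.Dict.getD_of_mem_items _ this hnd 0
      simp only [List.map_cons, List.sum_cons, hx, sumOf, ih (fun y hy => hmem y (List.mem_cons_of_mem _ hy))]

theorem chunk_eq (d : PySem.Dict String Int) (hnd : d.keys.Nodup) (k : Nat) :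
    (pyCombinations (d.items.map Prod.fst) (k + 1)).map
        (fun combo => (PySem.Str.join "+" combo,
          ((combo.map (fun p => PySem.Dict.getD d p 0))).sum))
      = (layerC d.items (k + 1)).map projT := by
  rw [pyCombinations_map, List.map_map]
  simp only [layerC, List.map_map]
  apply List.map_congr_left
  intro c hc
  have hsub := combR_sublist d.items (k + 1) c hc
  have hne : c.1 ≠ [] := by
    intro h; rw [h] at hsub; simp at hsub
  have hmem : ∀ x ∈ c.1, x ∈ d.items := fun x hx => hsub.1.mem hx
  simp only [Function.comp_def, projT]
  rw [nameOf_eq_join c.1 hne, sum_getD_eq d hnd c.1 hmem]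

theorem range_toNat (n : Nat) : (((n : Int) + 1 - 1)).toNat = n := by omega

theorem layerC_nil_one : layerC [] 1 = [] := by simp [layerC, combR]

theorem chunks_shift (items : List (String × Int)) :
    (List.range items.length).flatMap (fun k => (layerC items (k + 1)).map projT)
      = (layerC items 1).map projT
        ++ (List.range items.length).flatMap
            (fun i => (layerC items (1 + 1 + i)).map projT) := by
  cases hn : items.length with
  | zero =>
      have : items = [] := List.length_eq_zero_iff.mp hn
      subst this
      simp [layerC_nil_one]
  | succ m =>
      have hlast : layerC items (1 + 1 + m) = [] := by
        have : combR items (1 + 1 + m) = [] := combR_nil_of_lt items _ (by omega)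
        simp [layerC, this]
      conv_lhs => rw [List.range_succ_eq_map]
      conv_rhs => rw [List.range_succ]
      rw [List.flatMap_cons, List.flatMap_map, List.flatMap_append]
      simp only [List.flatMap_cons, List.flatMap_nil, hlast, List.map_nil,
        List.append_nil]
      congr 1
      exact congrArg (fun f => List.flatMap f (List.range m))
        (funext fun i => by
          rw [show 1 + 1 + i = Nat.succ i + 1 from by omega])

-- ===== VERDICT (by name: the statement is the Claim_ definition above) =====
theorem help_test_mvws_spec : Claim_equal_help_test_mvws := by
  intro xs _
  unfold Spec_help_test_mvws
  simp only [help_test_mvws, help_test_mvws_alt]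
  have hnd : (PySem.Dict.ofList xs).keys.Nodup := PySem.Dict.nodup_keys_ofList xs
  set d := PySem.Dict.ofList xs with hd
  set total : Int := (PySem.Dict.values d).sum with htot
  -- A side: range, then nested folds to pvIns over a flatMap of chunks
  simp only [PySem.Dict.keys, List.length_map]
  rw [PySem.List.pyRange_one]
  rw [range_toNat]
  rw [List.foldl_map]
  have htn : ∀ k : Nat, ((1 : Int) + (k : Int)).toNat = k + 1 := by intro k; omega
  simp only [htn]
  have inner : ∀ (acc : PySem.Dict String Int) (k : Nat),
      (pyCombinations (d.items.map Prod.fst) (k + 1)).foldl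
          (fun acc2 combo =>
            PySem.Dict.insert acc2 (PySem.Str.join "+" combo)
              (if total < 2 * ((combo.map (fun p => PySem.Dict.getD d p 0)).sum) then 1 else 0))
          acc
        = pvIns total acc
            ((pyCombinations (d.items.map Prod.fst) (k + 1)).map
              (fun combo => (PySem.Str.join "+" combo,
                (combo.map (fun p => PySem.Dict.getD d p 0)).sum))) := by
    intro acc k
    rw [pvIns, List.foldl_map]
  simp only [inner]
  rw [foldl_pvIns]
  simp only [chunk_eq d hnd]
  -- B side: seed then loop
  rw [altSeed_eq]
  dsimp only
  simp only [List.nil_append]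
  have hloop := altLoop_eq total d.items d.items.length 1
    (pvIns total (PySem.Dict.insert PySem.Dict.empty "" 0) ((layerC d.items 1).map projT))
    (le_refl 1)
  rw [hloop]
  rw [← pvIns_append, chunks_shift]
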